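-- pv_equiv track=rewrite | github.com/victoryagovitov-cloud/truelivebet | sports_analyzer/analyzers/football_analyzer.py | _calculate_form_score
-- ===== SOURCE A (Python) =====
-- def _calculate_form_score(form: str) -> int:
--     """Вычисляет очки формы команды на основе последних результатов"""
--     if not form:
--         return 50
--
--     score = 0
--     for result in form:
--         if result == 'W':
--             score += 20
--         elif result == 'D':
--             score += 10
--         elif result == 'L':
--             score += 0
--
--     return score
-- ===== SOURCE B (Python) =====
-- _POINTS = {'W': 20, 'D': 10}
--
--
-- def _calculate_form_score(form: str) -> int:
--     if not form:
--         return 50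
--
--     def go(s: str) -> int:
--         if not s:
--             return 0
--         if len(s) == 1:
--             return _POINTS.get(s, 0)
--         mid = len(s) // 2
--         return go(s[:mid]) + go(s[mid:])
--
--     return go(form)
-- ===== Notes on version B (the rewrite author's own statement) =====
-- stated objective: alternative
-- what changed: Replaces the single imperative accumulator loop with an if/elif branch chain by a divide-and-conquer recursion: split the string in half, score each half recursively, add; single characters are scored via a lookup-table dict.
import Mathlib
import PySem

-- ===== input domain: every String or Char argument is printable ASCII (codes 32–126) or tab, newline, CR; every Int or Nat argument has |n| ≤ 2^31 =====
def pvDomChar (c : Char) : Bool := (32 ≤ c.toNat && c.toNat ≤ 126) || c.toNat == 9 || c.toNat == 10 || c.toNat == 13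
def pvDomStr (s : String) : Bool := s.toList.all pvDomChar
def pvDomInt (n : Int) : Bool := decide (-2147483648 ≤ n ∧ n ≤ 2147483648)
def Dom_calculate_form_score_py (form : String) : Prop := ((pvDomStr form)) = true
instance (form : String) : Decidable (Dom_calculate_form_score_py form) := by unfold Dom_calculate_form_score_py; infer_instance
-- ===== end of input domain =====

-- B replaces A's accumulator loop with branch chain by a divide-and-conquer recursion
-- (split in half, add the halves' scores; single chars scored via a lookup-table dict).
-- Objective: alternative.

-- ===== PORT A =====
def calculate_form_score_py (form : String) : Int :=
  if PySem.Str.len form = 0 then 50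
  else
    form.toList.foldl (fun score result =>
      if result = 'W' then score + 20
      else if result = 'D' then score + 10
      else if result = 'L' then score + 0
      else score) 0

-- ===== PORT B =====
-- _POINTS = {'W': 20, 'D': 10}
def pvPoints : PySem.Dict Char Int :=
  (PySem.Dict.empty.insert 'W' 20).insert 'D' 10

-- inner helper go: empty → 0, single char → table lookup, else split at len//2 and add
-- (structural recursion on a fuel bound ≥ length, a totality device only)
def pvGoF : Nat → List Char → Int
  | 0, _ => 0
  | Nat.succ fuel, l =>
    if l = [] then 0
    else if l.length = 1 then pvPoints.getD l.headI 0
    else pvGoF fuel (l.take (l.length / 2)) + pvGoF fuel (l.drop (l.length / 2))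

def pvGo (l : List Char) : Int := pvGoF l.length l

def calculate_form_score_py_alt (form : String) : Int :=
  if PySem.Str.len form = 0 then 50
  else pvGo form.toList

-- ===== PRECONDITION & SPEC =====
def Spec_calculate_form_score_py (form : String) (out : Int) : Prop := out = calculate_form_score_py_alt form
instance (form : String) (out : Int) : Decidable (Spec_calculate_form_score_py form out) := by unfold Spec_calculate_form_score_py; infer_instance

-- ===== CLAIM (what is proved, stated in full; the proofs are below) =====
def Claim_equal_calculate_form_score_py : Prop := ∀ (form : String), Dom_calculate_form_score_py form → Spec_calculate_form_score_py form (calculate_form_score_py form)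

-- ===== LEMMAS AND PROOFS =====

-- B's divide-and-conquer recursion computes the sum of per-character points
theorem pvGoF_eq_sum : ∀ (n : ℕ) (l : List Char), l.length ≤ n →
    pvGoF n l = (l.map (fun c => pvPoints.getD c 0)).sum := by
  intro n
  induction n with
  | zero =>
    intro l h
    have : l = [] := List.eq_nil_of_length_eq_zero (Nat.le_zero.mp h)
    subst this; simp [pvGoF]
  | succ n ih =>
    intro l h
    rw [pvGoF]
    by_cases h0 : l = []
    · subst h0; simp
    · by_cases h1 : l.length = 1
      · obtain ⟨c, hc⟩ : ∃ c, l = [c] := by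
          cases l with
          | nil => simp at h0
          | cons x t =>
            cases t with
            | nil => exact ⟨x, rfl⟩
            | cons y u => simp at h1
        subst hc; simp
      · have hlen : 2 ≤ l.length := by
          have : l.length ≠ 0 := by simpa using h0
          omega
        rw [if_neg h0, if_neg h1,
          ih (l.take (l.length / 2)) (by simp; omega),
          ih (l.drop (l.length / 2)) (by simp; omega)]
        rw [← List.sum_append, ← List.map_append, List.take_append_drop]

theorem pvGo_eq_sum (l : List Char) :
    pvGo l = (l.map (fun c => pvPoints.getD c 0)).sum :=
  pvGoF_eq_sum l.length l le_rfl

-- A's accumulation loop equals s plus the sum of per-character points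
theorem pv_foldl_eq_sum (l : List Char) (s : Int) :
    l.foldl (fun score result =>
      if result = 'W' then score + 20
      else if result = 'D' then score + 10
      else if result = 'L' then score + 0
      else score) s = s + (l.map (fun c => pvPoints.getD c 0)).sum := by
  induction l generalizing s with
  | nil => simp
  | cons x t ih =>
    simp only [List.foldl_cons, ih, List.map_cons, List.sum_cons, pvPoints,
      PySem.Dict.getD_insert, PySem.Dict.getD_empty]
    by_cases hw : x = 'W' <;> by_cases hd : x = 'D' <;> by_cases hl : x = 'L' <;>
      simp [hw, hd, hl] <;> omega

-- ===== VERDICT (by name: the statement is the Claim_ definition above) =====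
theorem calculate_form_score_py_spec : Claim_equal_calculate_form_score_py := by
  intro form _
  unfold Spec_calculate_form_score_py calculate_form_score_py calculate_form_score_py_alt
  by_cases h : form = ""
  · simp [h]
  · have hl : ¬ PySem.Str.len form = 0 := by
      simpa [PySem.Str.len_eq, String.toList_eq_nil_iff] using h
    rw [if_neg hl, if_neg hl, pv_foldl_eq_sum, pvGo_eq_sum]
    ring
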